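-- pv_equiv track=rewrite | github.com/ConflictGK/CodeCatch-RSSE | experiments/process_search_length.py | search_length
-- ===== SOURCE A (Python) =====
-- def search_length(examined_results, num_relevant_results_required, max_number=15):
-- 	result_number = 0
-- 	number_of_irrelevant_results = 0
-- 	for res in examined_results:
-- 		if res == 1:
-- 			result_number += 1
-- 			if result_number == num_relevant_results_required:
-- 				return number_of_irrelevant_results
-- 		else:
-- 			number_of_irrelevant_results += 1
-- 	return max_number
-- ===== SOURCE B (Python) =====
-- def search_length(examined_results, num_relevant_results_required, max_number=15):
--     positions = [i for i, r in enumerate(examined_results) if r == 1]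
--     n = num_relevant_results_required
--     if 1 <= n <= len(positions):
--         return positions[n - 1] - (n - 1)
--     return max_number
-- ===== Notes on version B (the rewrite author's own statement) =====
-- stated objective: simpler
-- what changed: Replaces A's live dual-counter early-return loop with a build-an-index pass (list of relevant positions) plus a closed-form answer positions[n-1]-(n-1), since among the first positions[n-1] results exactly n-1 are relevant.
import Mathlib
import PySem

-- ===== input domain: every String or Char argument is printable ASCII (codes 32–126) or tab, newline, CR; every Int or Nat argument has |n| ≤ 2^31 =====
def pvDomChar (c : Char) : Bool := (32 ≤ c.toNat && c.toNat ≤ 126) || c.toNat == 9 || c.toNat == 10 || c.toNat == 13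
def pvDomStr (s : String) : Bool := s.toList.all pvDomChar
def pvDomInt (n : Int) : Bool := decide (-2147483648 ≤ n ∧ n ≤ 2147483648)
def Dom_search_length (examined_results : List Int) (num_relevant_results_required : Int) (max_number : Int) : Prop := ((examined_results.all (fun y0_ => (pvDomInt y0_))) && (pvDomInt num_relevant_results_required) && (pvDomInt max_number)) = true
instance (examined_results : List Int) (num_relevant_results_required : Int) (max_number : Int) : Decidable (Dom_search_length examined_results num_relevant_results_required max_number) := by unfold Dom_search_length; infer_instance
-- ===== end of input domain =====

-- B replaces A's dual-counter early-return loop by building the list of relevant positions and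
-- reading the answer off in closed form (positions[n-1] - (n-1)); a simpler decomposition, same cost.

-- ===== PORT A =====
-- loop of A: state (result_number, number_of_irrelevant_results), early return on the N-th relevant result
def searchLoop (N maxn : Int) : List Int → Int → Int → Int
  | [], _, _ => maxn
  | r :: t, rn, irr =>
    if r = 1 then
      if rn + 1 = N then irr else searchLoop N maxn t (rn + 1) irr
    else searchLoop N maxn t rn (irr + 1)

def search_length (examined_results : List Int) (num_relevant_results_required : Int) (max_number : Int) : Int :=
  searchLoop num_relevant_results_required max_number examined_results 0 0

-- ===== PORT B =====
def search_length_alt (examined_results : List Int) (num_relevant_results_required : Int) (max_number : Int) : Int :=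
  let positions : List Int :=
    ((PySem.List.enumerate examined_results 0).filter (fun p => p.2 == 1)).map (·.1)
  let n := num_relevant_results_required
  if 1 ≤ n ∧ n ≤ positions.length then
    (PySem.List.pyGet? positions (n - 1)).getD 0 - (n - 1)
  else
    max_number

-- ===== PRECONDITION & SPEC =====
def Spec_search_length (examined_results : List Int) (num_relevant_results_required : Int) (max_number : Int) (out : Int) : Prop := out = search_length_alt examined_results num_relevant_results_required max_number
instance (examined_results : List Int) (num_relevant_results_required : Int) (max_number : Int) (out : Int) : Decidable (Spec_search_length examined_results num_relevant_results_required max_number out) := by unfold Spec_search_length; infer_instance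

-- ===== CLAIM (what is proved, stated in full; the proofs are below) =====
def Claim_equal_search_length : Prop := ∀ (examined_results : List Int) (num_relevant_results_required : Int) (max_number : Int), Dom_search_length examined_results num_relevant_results_required max_number → Spec_search_length examined_results num_relevant_results_required max_number (search_length examined_results num_relevant_results_required max_number)

-- ===== LEMMAS AND PROOFS =====

-- ===== VERDICT (by name: the statement is the Claim_ definition above) =====
-- proof-side characterisation of the relevant positions of a list
def posOne : List Int → List Int
  | [] => []
  | r :: t => if r = 1 then 0 :: (posOne t).map (· + 1) else (posOne t).map (· + 1)

theorem enum_filter_pos (l : List Int) (s : Int) :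
    ((PySem.List.enumerate l s).filter (fun p => p.2 == 1)).map (·.1)
      = (posOne l).map (· + s) := by
  induction l generalizing s with
  | nil => simp [posOne, PySem.List.enumerate_nil]
  | cons r t ih =>
    by_cases hr : r = 1 <;>
      simp [posOne, PySem.List.enumerate_cons, hr, ih, List.map_map] <;>
      omega

theorem getD_map_add_one (l : List Int) (i : Nat) (hi : i < l.length) :
    (l.map (· + 1)).getD i 0 = l.getD i 0 + 1 := by
  rw [List.getD_eq_getElem?_getD, List.getD_eq_getElem?_getD, List.getElem?_map,
    List.getElem?_eq_getElem hi]
  simp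

theorem loop_eq (l : List Int) (N maxn : Int) : ∀ (rn irr : Int),
    searchLoop N maxn l rn irr =
      if 1 ≤ N - rn ∧ N - rn ≤ ((posOne l).length : Int) then
        irr + ((posOne l).getD (N - rn - 1).toNat 0 - (N - rn - 1))
      else maxn := by
  induction l with
  | nil =>
    intro rn irr
    rw [if_neg (by simp [posOne]; omega)]
    rfl
  | cons r t ih =>
    intro rn irr
    by_cases hr : r = 1
    · by_cases hN : rn + 1 = N
      · have hcond : 1 ≤ N - rn ∧ N - rn ≤ ((posOne (r :: t)).length : Int) := by
          constructor
          · omega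
          · simp [posOne, hr]; omega
        rw [searchLoop, if_pos hr, if_pos hN, if_pos hcond]
        have hidx : (N - rn - 1).toNat = 0 := by omega
        simp [posOne, hr, hidx]
        omega
      · rw [searchLoop, if_pos hr, if_neg hN, ih]
        have hlen : ((posOne (r :: t)).length : Int) = ((posOne t).length : Int) + 1 := by
          simp [posOne, hr]
        by_cases hc : 1 ≤ N - (rn + 1) ∧ N - (rn + 1) ≤ ((posOne t).length : Int)
        · rw [if_pos hc, if_pos (by omega)]
          have h2 : 2 ≤ N - rn := by omega
          have hidx : (N - rn - 1).toNat = (N - (rn + 1) - 1).toNat + 1 := by omega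
          have hlt : (N - (rn + 1) - 1).toNat < (posOne t).length := by omega
          simp only [posOne, if_pos hr, hidx, List.getD_cons_succ]
          rw [getD_map_add_one _ _ hlt]
          omega
        · rw [if_neg hc, if_neg (by omega)]
    · rw [searchLoop, if_neg hr, ih]
      have hlen : ((posOne (r :: t)).length : Int) = ((posOne t).length : Int) := by
        simp [posOne, hr]
      by_cases hc : 1 ≤ N - rn ∧ N - rn ≤ ((posOne t).length : Int)
      · rw [if_pos hc, if_pos (by omega)]
        have hlt : (N - rn - 1).toNat < (posOne t).length := by omega
        simp only [posOne, if_neg hr]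
        rw [getD_map_add_one _ _ hlt]
        omega
      · rw [if_neg hc, if_neg (by omega)]

-- ===== VERDICT (by name: the statement is the Claim_ definition above) =====
theorem search_length_spec : Claim_equal_search_length := by
  intro l N m _
  unfold Spec_search_length search_length search_length_alt
  have hpos : ((PySem.List.enumerate l 0).filter (fun p => p.2 == 1)).map (·.1) = posOne l := by
    rw [enum_filter_pos]
    simp
  rw [loop_eq]
  simp only [hpos, sub_zero]
  by_cases hc : 1 ≤ N ∧ N ≤ ((posOne l).length : Int)
  · rw [if_pos hc, if_pos (by exact_mod_cast hc)]
    have hlt : (N - 1).toNat < (posOne l).length := by omega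
    rw [show PySem.List.pyGet? (posOne l) (N - 1) = (posOne l)[(N - 1).toNat]? from PySem.List.pyGet?_of_nonneg (posOne l) (by omega), List.getElem?_eq_getElem hlt]
    rw [List.getD_eq_getElem?_getD, List.getElem?_eq_getElem hlt]
    simp
  · rw [if_neg hc, if_neg (by exact_mod_cast hc)]
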